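-- pv_equiv track=rewrite | github.com/abdelnassermustafa-eng/NetPilotAI | tools/netpilot-doctor/netpilot-doctor-v1_1.py | normalize_block
-- ===== SOURCE A (Python) =====
-- from typing import List, Dict, Tuple, Optional
--
-- def normalize_block(lines: List[str]) -> List[str]:
--     out = []
--     for ln in lines:
--         s = ln.rstrip()
--         if s.strip() == "":
--             # collapse excessive blank lines later
--             out.append("")
--         else:
--             out.append(s)
--     # collapse multiple blank lines
--     collapsed = []
--     blank = False
--     for s in out:
--         if s == "":
--             if not blank:
--                 collapsed.append("")
--             blank = True
--         else:
--             collapsed.append(s.strip())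
--             blank = False
--     # trim leading/trailing blanks
--     while collapsed and collapsed[0] == "":
--         collapsed.pop(0)
--     while collapsed and collapsed[-1] == "":
--         collapsed.pop()
--     return collapsed
-- ===== SOURCE B (Python) =====
-- from typing import List
--
-- def normalize_block(lines: List[str]) -> List[str]:
--     result = []
--     for ln in lines:
--         s = ln.strip()
--         if s:
--             result.append(s)
--         elif result and result[-1] != "":
--             result.append("")
--     while result and result[-1] == "":
--         result.pop()
--     return result
-- ===== Notes on version B (the rewrite author's own statement) =====
-- stated objective: simpler
-- what changed: Replaces A's four phases (rstrip-map, blank-collapse fold with a flag, leading-blank trim, trailing-blank trim) with a single pass that appends the stripped line, emitting a blank separator only when the output is non-empty and not already blank-terminated, followed by one trailing-blank trim.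
import Mathlib
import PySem

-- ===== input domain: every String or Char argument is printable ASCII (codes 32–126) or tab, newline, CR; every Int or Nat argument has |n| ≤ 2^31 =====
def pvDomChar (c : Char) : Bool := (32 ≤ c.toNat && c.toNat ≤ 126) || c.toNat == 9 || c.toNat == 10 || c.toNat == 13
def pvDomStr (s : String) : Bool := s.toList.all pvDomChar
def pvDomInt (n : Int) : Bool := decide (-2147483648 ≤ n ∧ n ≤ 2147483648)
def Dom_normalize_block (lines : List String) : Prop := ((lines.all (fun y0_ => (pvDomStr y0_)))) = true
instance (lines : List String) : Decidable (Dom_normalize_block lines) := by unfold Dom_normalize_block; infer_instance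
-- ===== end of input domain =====

-- B replaces A's four phases (rstrip-map, blank-collapse fold, leading trim, trailing trim)
-- with one pass plus a trailing trim: objective 'simpler' (same O(n) cost).

-- shared helper: the `while xs and xs[-1] == "": xs.pop()` loop both Pythons end with
def pvPopTrailing : List String → List String
  | [] => []
  | x :: xs =>
    match pvPopTrailing xs with
    | [] => if x = "" then [] else [x]
    | ys => x :: ys

-- ===== PORT A =====
def normalize_block (lines : List String) : List String :=
  -- first pass: rstrip each line, collapse whitespace-only lines to ""
  let out : List String := lines.foldl (fun acc ln =>
    let s := PySem.Str.rstrip ln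
    if PySem.Str.strip s = "" then acc ++ [""] else acc ++ [s]) []
  -- second pass: collapse runs of "" with a `blank` flag, stripping kept lines
  let st : List String × Bool := out.foldl (fun st s =>
    if s = "" then
      (if st.2 = false then st.1 ++ [""] else st.1, true)
    else
      (st.1 ++ [PySem.Str.strip s], false)) ([], false)
  -- while collapsed and collapsed[0] == "": collapsed.pop(0)
  let collapsed := st.1.dropWhile (fun x => x == "")
  -- while collapsed and collapsed[-1] == "": collapsed.pop()
  pvPopTrailing collapsed

-- ===== PORT B =====
def normalize_block_alt (lines : List String) : List String :=
  let result : List String := lines.foldl (fun res ln =>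
    let s := PySem.Str.strip ln
    if s ≠ "" then res ++ [s]
    else if res ≠ [] ∧ res.getLast? ≠ some "" then res ++ [""]
    else res) []
  pvPopTrailing result

-- ===== PRECONDITION & SPEC =====
def Spec_normalize_block (lines : List String) (out : List String) : Prop := out = normalize_block_alt lines
instance (lines : List String) (out : List String) : Decidable (Spec_normalize_block lines out) := by unfold Spec_normalize_block; infer_instance

-- ===== CLAIM (what is proved, stated in full; the proofs are below) =====
def Claim_equal_normalize_block : Prop := ∀ (lines : List String), Dom_normalize_block lines → Spec_normalize_block lines (normalize_block lines)

-- ===== LEMMAS AND PROOFS =====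

-- proof-only names for the two steps of port A (definitionally the port's lambdas)
def pvStepOut (acc : List String) (ln : String) : List String :=
  let s := PySem.Str.rstrip ln
  if PySem.Str.strip s = "" then acc ++ [""] else acc ++ [s]

def pvStepCol (st : List String × Bool) (s : String) : List String × Bool :=
  if s = "" then
    (if st.2 = false then st.1 ++ [""] else st.1, true)
  else
    (st.1 ++ [PySem.Str.strip s], false)

-- canonical single step A's two fused passes reduce to
def pvStepC (st : List String × Bool) (ln : String) : List String × Bool :=
  if PySem.Str.strip ln = "" then
    (if st.2 = false then st.1 ++ [""] else st.1, true)
  else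
    (st.1 ++ [PySem.Str.strip ln], false)

-- proof-only name for port B's step (definitionally the port's lambda)
def pvStepB (res : List String) (ln : String) : List String :=
  let s := PySem.Str.strip ln
  if s ≠ "" then res ++ [s]
  else if res ≠ [] ∧ res.getLast? ≠ some "" then res ++ [""]
  else res

theorem pv_dropWhile_dropWhile {α : Type} (p : α → Bool) (l : List α) :
    (l.dropWhile p).dropWhile p = l.dropWhile p := by
  induction l with
  | nil => rfl
  | cons a t ih =>
    by_cases h : p a = true
    · simp [h, ih]
    · simp [h]

theorem pv_lstrip_rstrip (s : List Char) :
    PySem.Chars.lstrip (PySem.Chars.rstrip s) = PySem.Chars.rstrip (PySem.Chars.lstrip s) := by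
  induction s with
  | nil => rfl
  | cons c t ih =>
    simp only [PySem.Chars.lstrip, PySem.Chars.rstrip] at *
    by_cases hc : PySem.Chars.isspace c = true
    · by_cases ht : t.reverse.dropWhile PySem.Chars.isspace = []
      · have hall : ∀ x ∈ t, PySem.Chars.isspace x = true := by
          intro x hx
          have := (List.dropWhile_eq_nil_iff).1 ht x (by simpa using hx)
          simpa using this
        have htd : t.dropWhile PySem.Chars.isspace = [] :=
          List.dropWhile_eq_nil_iff.2 hall
        simp [List.reverse_cons, List.dropWhile_append, ht, hc, htd]
      · simp [List.reverse_cons, List.dropWhile_append, ht, hc] at ih ⊢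
        exact ih
    · by_cases ht : t.reverse.dropWhile PySem.Chars.isspace = []
      · simp [List.reverse_cons, List.dropWhile_append, ht, hc]
      · simp [List.reverse_cons, List.dropWhile_append, ht, hc]

theorem pv_rstrip_idem (s : List Char) :
    PySem.Chars.rstrip (PySem.Chars.rstrip s) = PySem.Chars.rstrip s := by
  simp [PySem.Chars.rstrip, pv_dropWhile_dropWhile]

theorem pv_strip_rstrip (s : String) :
    PySem.Str.strip (PySem.Str.rstrip s) = PySem.Str.strip s := by
  simp only [PySem.Str.strip, PySem.Str.rstrip, PySem.Chars.strip]
  rw [String.toList_ofList]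
  rw [pv_lstrip_rstrip, pv_rstrip_idem]

-- one fused step of A's first two passes equals pvStepC
theorem pv_step_fuse (st : List String × Bool) (ln : String) :
    pvStepCol st (if PySem.Str.strip (PySem.Str.rstrip ln) = "" then "" else PySem.Str.rstrip ln)
      = pvStepC st ln := by
  by_cases h : PySem.Str.strip (PySem.Str.rstrip ln) = ""
  · have h' : PySem.Str.strip ln = "" := by rw [← pv_strip_rstrip]; exact h
    simp [pvStepCol, pvStepC, h, h']
  · have hne : PySem.Str.rstrip ln ≠ "" := by
      intro he; exact h (by rw [he]; rfl)
    have h' : PySem.Str.strip ln ≠ "" := by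
      rw [← pv_strip_rstrip]; exact h
    simp [pvStepCol, pvStepC, hne, h', pv_strip_rstrip]

-- A's first two folds fused into a single fold with pvStepC
theorem pv_A_fused (lines : List String) (acc : List String) (st : List String × Bool) :
    (lines.foldl pvStepOut acc).foldl pvStepCol st
      = lines.foldl pvStepC (acc.foldl pvStepCol st) := by
  induction lines generalizing acc st with
  | nil => rfl
  | cons ln t ih =>
    simp only [List.foldl_cons]
    rw [ih]
    have hinit : (pvStepOut acc ln).foldl pvStepCol st = pvStepC (acc.foldl pvStepCol st) ln := by
      have : pvStepOut acc ln
          = acc ++ [if PySem.Str.strip (PySem.Str.rstrip ln) = "" then "" else PySem.Str.rstrip ln] := by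
        by_cases h : PySem.Str.strip (PySem.Str.rstrip ln) = "" <;> simp [pvStepOut, h]
      rw [this, List.foldl_append]
      simp only [List.foldl_cons, List.foldl_nil]
      exact pv_step_fuse _ _
    rw [hinit]

theorem pv_getLast?_dropWhile {α : Type} [BEq α] [LawfulBEq α] (p : α → Bool) (l : List α)
    (h : l.dropWhile p ≠ []) : (l.dropWhile p).getLast? = l.getLast? := by
  obtain ⟨t, ht⟩ := List.dropWhile_suffix (l := l) (p := p)
  conv_rhs => rw [← ht]
  exact (List.getLast?_append_of_ne_nil t h).symm

-- main invariant: B's fold tracks the dropWhile of A's collapsed list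
theorem pv_main (lines : List String) (c : List String) (b : Bool)
    (hb : b = true ↔ c.getLast? = some "") :
    lines.foldl pvStepB (c.dropWhile (fun x => x == ""))
      = ((lines.foldl pvStepC (c, b)).1).dropWhile (fun x => x == "") := by
  induction lines generalizing c b with
  | nil => rfl
  | cons ln t ih =>
    simp only [List.foldl_cons]
    by_cases h : PySem.Str.strip ln = ""
    · cases b with
      | false =>
        -- blank line, blank flag not set: A appends "" to c
        have hlast : ¬ c.getLast? = some "" := fun hc => absurd (hb.2 hc) (by decide)
        have hstep : pvStepC (c, false) ln = (c ++ [""], true) := by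
          simp [pvStepC, h]
        rw [hstep]
        by_cases hd : c.dropWhile (fun x => x == "") = []
        · have : pvStepB (c.dropWhile (fun x => x == "")) ln
              = (c ++ [""]).dropWhile (fun x => x == "") := by
            simp [pvStepB, h, hd, List.dropWhile_append]
          rw [this]
          exact ih (c ++ [""]) true (by simp)
        · have hlast' : (c.dropWhile (fun x => x == "")).getLast? = c.getLast? :=
            pv_getLast?_dropWhile _ _ hd
          have : pvStepB (c.dropWhile (fun x => x == "")) ln
              = (c ++ [""]).dropWhile (fun x => x == "") := by
            simp only [pvStepB, h]
            simp only [ne_eq, not_true_eq_false, if_false]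
            rw [if_pos ⟨hd, by rw [hlast']; exact hlast⟩]
            rw [List.dropWhile_append]
            simp [hd]
          rw [this]
          exact ih (c ++ [""]) true (by simp)
      | true =>
        -- blank line, blank flag set: A leaves c unchanged; last of c is ""
        have hlast : c.getLast? = some "" := hb.1 rfl
        have hstep : pvStepC (c, true) ln = (c, true) := by
          simp [pvStepC, h]
        rw [hstep]
        have : pvStepB (c.dropWhile (fun x => x == "")) ln
            = c.dropWhile (fun x => x == "") := by
          by_cases hd : c.dropWhile (fun x => x == "") = []
          · simp [pvStepB, h, hd]
          · have hlast' : (c.dropWhile (fun x => x == "")).getLast? = some "" := by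
              rw [pv_getLast?_dropWhile _ _ hd]; exact hlast
            simp [pvStepB, h, hlast']
        rw [this]
        exact ih c true hb
    · -- non-blank line: both append the stripped line
      have hstep : pvStepC (c, b) ln = (c ++ [PySem.Str.strip ln], false) := by
        simp [pvStepC, h]
      rw [hstep]
      have : pvStepB (c.dropWhile (fun x => x == "")) ln
          = (c ++ [PySem.Str.strip ln]).dropWhile (fun x => x == "") := by
        simp only [pvStepB, h, ne_eq, not_false_eq_true, if_true]
        rw [List.dropWhile_append]
        by_cases hd : c.dropWhile (fun x => x == "") = []
        · simp [hd, h]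
        · simp [hd]
      rw [this]
      refine ih (c ++ [PySem.Str.strip ln]) false ?_
      simp [h]

-- ===== VERDICT (by name: the statement is the Claim_ definition above) =====
theorem normalize_block_spec : Claim_equal_normalize_block := by
  intro lines _
  show normalize_block lines = normalize_block_alt lines
  have hA : normalize_block lines
      = pvPopTrailing (((lines.foldl pvStepOut []).foldl pvStepCol ([], false)).1.dropWhile
          (fun x => x == "")) := rfl
  have hB : normalize_block_alt lines = pvPopTrailing (lines.foldl pvStepB []) := rfl
  rw [hA, hB, pv_A_fused]
  simp only [List.foldl_nil]
  have hm := pv_main lines [] false (by simp)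
  simp only [List.dropWhile_nil] at hm
  rw [hm]
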